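-- pv_equiv track=rewrite | github.com/hwuu/pyscan | pyscan/context_builder.py | _prioritize_callers
-- ===== SOURCE A (Python) =====
-- from typing import List, Dict, Any
--
-- def _prioritize_callers(
--     callers: List[str], is_public_api: bool
-- ) -> List[str]:
--     """
--     Prioritize callers by relevance.
--
--     Args:
--         callers: List of caller code strings.
--         is_public_api: Whether current function is public API.
--
--     Returns:
--         Sorted list of callers (most important first).
--     """
--     # 计算每个 caller 的优先级分数
--     caller_scores = []
--
--     for caller_code in callers:
--         score = 0
--
--         # 规则1: 公共 API 的 caller 更重要 (+10)
--         if is_public_api and any(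
--             indicator in caller_code.lower()
--             for indicator in ['@route', '@api_view', '@endpoint', '@get', '@post']
--         ):
--             score += 10
--
--         # 规则2: 代码较短的 caller 更容易理解 (+5 for <10 lines)
--         line_count = len(caller_code.split('\n'))
--         if line_count < 10:
--             score += 5
--         elif line_count < 20:
--             score += 3
--
--         # 规则3: 包含错误处理的 caller 更重要 (+3)
--         if 'try:' in caller_code or 'except' in caller_code:
--             score += 3
--
--         caller_scores.append((score, caller_code))
--
--     # 按分数降序排序
--     caller_scores.sort(key=lambda x: x[0], reverse=True)
--
--     return [code for score, code in caller_scores]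
-- ===== SOURCE B (Python) =====
-- from typing import List
--
-- _LEVELS = [18, 16, 15, 13, 10, 8, 6, 5, 3, 0]  # every reachable score, descending
--
--
-- def _score(caller_code: str, is_public_api: bool) -> int:
--     score = 0
--     if is_public_api and any(
--         indicator in caller_code.lower()
--         for indicator in ['@route', '@api_view', '@endpoint', '@get', '@post']
--     ):
--         score += 10
--     line_count = len(caller_code.split('\n'))
--     if line_count < 10:
--         score += 5
--     elif line_count < 20:
--         score += 3
--     if 'try:' in caller_code or 'except' in caller_code:
--         score += 3
--     return score
--
--
-- def _prioritize_callers(callers: List[str], is_public_api: bool) -> List[str]: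
--     # Bucket pass over the fixed score range instead of sorting: one filter
--     # pass per possible score, descending, keeps ties in original order.
--     scored = [(_score(c, is_public_api), c) for c in callers]
--     out = []
--     for level in _LEVELS:
--         for s, c in scored:
--             if s == level:
--                 out.append(c)
--     return out
-- ===== Notes on version B (the rewrite author's own statement) =====
-- stated objective: alternative
-- what changed: Replaced the build-pairs-then-stable-reverse-sort with a counting/bucket pass: scores take only the 10 values [18,16,15,13,10,8,6,5,3,0], so B scores each caller once and then emits, for each possible score in descending order, the callers with that score in original order.
import Mathlib
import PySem

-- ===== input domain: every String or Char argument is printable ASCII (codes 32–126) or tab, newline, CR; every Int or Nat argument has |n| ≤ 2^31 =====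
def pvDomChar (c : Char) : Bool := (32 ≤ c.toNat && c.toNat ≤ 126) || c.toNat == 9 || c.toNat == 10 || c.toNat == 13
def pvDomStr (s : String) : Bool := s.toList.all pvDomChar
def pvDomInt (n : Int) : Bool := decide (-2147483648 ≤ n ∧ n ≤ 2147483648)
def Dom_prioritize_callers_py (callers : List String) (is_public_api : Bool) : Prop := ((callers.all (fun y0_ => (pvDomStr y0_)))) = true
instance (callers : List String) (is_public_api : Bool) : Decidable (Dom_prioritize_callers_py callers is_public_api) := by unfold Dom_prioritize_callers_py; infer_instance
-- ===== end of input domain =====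

-- B replaces the stable reverse sort by one bucket pass per possible score value, descending (same output).

-- ===== PORT A =====
-- shared scoring expression (identical lines in both Pythons)
def callerScore (caller_code : String) (is_public_api : Bool) : Int :=
  let score : Int := 0
  let score := if is_public_api &&
      ((["@route", "@api_view", "@endpoint", "@get", "@post"] : List String).any
        (fun indicator => PySem.Str.isIn indicator (PySem.Str.lower caller_code)))
    then score + 10 else score
  -- len(caller_code.split('\n')): Chars.splitOn is exact for a nonempty separator
  let line_count : Int := ((PySem.Chars.splitOn caller_code.toList ['\n']).length : Int)
  let score := if line_count < 10 then score + 5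
               else if line_count < 20 then score + 3 else score
  let score := if PySem.Str.isIn "try:" caller_code || PySem.Str.isIn "except" caller_code
               then score + 3 else score
  score

def prioritize_callers_py (callers : List String) (is_public_api : Bool) : List String :=
  let caller_scores : List (Int × String) :=
    callers.foldl (fun acc caller_code => acc ++ [(callerScore caller_code is_public_api, caller_code)]) []
  let caller_scores := PySem.List.sorted caller_scores (fun x => x.1) true
  caller_scores.map (fun x => x.2)

-- ===== PORT B =====
def pvLevels : List Int := [18, 16, 15, 13, 10, 8, 6, 5, 3, 0]

def prioritize_callers_py_alt (callers : List String) (is_public_api : Bool) : List String :=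
  let scored : List (Int × String) := callers.map (fun c => (callerScore c is_public_api, c))
  pvLevels.foldl (fun out level =>
    scored.foldl (fun out sc => if sc.1 == level then out ++ [sc.2] else out) out) []

-- ===== PRECONDITION & SPEC =====
def Spec_prioritize_callers_py (callers : List String) (is_public_api : Bool) (out : List String) : Prop := out = prioritize_callers_py_alt callers is_public_api
instance (callers : List String) (is_public_api : Bool) (out : List String) : Decidable (Spec_prioritize_callers_py callers is_public_api out) := by unfold Spec_prioritize_callers_py; infer_instance

-- ===== CLAIM (what is proved, stated in full; the proofs are below) =====
def Claim_equal_prioritize_callers_py : Prop := ∀ (callers : List String) (is_public_api : Bool), Dom_prioritize_callers_py callers is_public_api → Spec_prioritize_callers_py callers is_public_api (prioritize_callers_py callers is_public_api)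

-- ===== LEMMAS AND PROOFS =====

-- insertBy puts x in front when every element of r has a strictly smaller key
lemma insertBy_head (x : Int × String) (r : List (Int × String))
    (h : ∀ y ∈ r, y.1 < x.1) :
    PySem.List.insertBy (fun a b : Int × String => decide (b.1 < a.1)) x r = x :: r := by
  cases r with
  | nil => simp [PySem.List.insertBy]
  | cons y t => simp [PySem.List.insertBy, h y (by simp)]

-- insertBy skips a prefix none of whose elements have a smaller key
lemma insertBy_skip (x : Int × String) (l r : List (Int × String))
    (h : ∀ y ∈ l, ¬ (y.1 < x.1)) :
    PySem.List.insertBy (fun a b : Int × String => decide (b.1 < a.1)) x (l ++ r)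
      = l ++ PySem.List.insertBy (fun a b : Int × String => decide (b.1 < a.1)) x r := by
  induction l with
  | nil => simp
  | cons y t ih =>
    have hy : ¬ (y.1 < x.1) := h y (by simp)
    simp [PySem.List.insertBy, hy, ih (fun z hz => h z (by simp [hz]))]

-- inserting x into the bucket decomposition appends it at the end of its own bucket
lemma insertBy_buckets (ks : List Int) (hks : ks.Pairwise (· > ·))
    (x : Int × String) (hx : x.1 ∈ ks) (xs : List (Int × String)) :
    PySem.List.insertBy (fun a b : Int × String => decide (b.1 < a.1)) x
        (ks.flatMap (fun k => xs.filter (fun y => y.1 == k)))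
      = ks.flatMap (fun k => (xs ++ [x]).filter (fun y => y.1 == k)) := by
  induction ks with
  | nil => cases hx
  | cons k ks ih =>
    rw [List.pairwise_cons] at hks
    obtain ⟨hk, hks'⟩ := hks
    simp only [List.flatMap_cons]
    by_cases hxk : x.1 = k
    · -- x belongs to the first bucket: skip it, then x goes in front of the rest
      have hkn : k ∉ ks := fun hmem => absurd (hk k hmem) (lt_irrefl k)
      rw [insertBy_skip x _ _ (by
        intro y hy
        have : y.1 = k := by simpa using (List.of_mem_filter hy)
        omega)]
      rw [insertBy_head x _ (by
        intro y hy
        simp only [List.mem_flatMap] at hy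
        obtain ⟨k', hk', hy'⟩ := hy
        have : y.1 = k' := by simpa using (List.of_mem_filter hy')
        have := hk k' hk'
        omega)]
      have h1 : (xs ++ [x]).filter (fun y => y.1 == k) = xs.filter (fun y => y.1 == k) ++ [x] := by
        simp [List.filter_append, hxk]
      have h2 : ks.flatMap (fun k' => (xs ++ [x]).filter (fun y => y.1 == k'))
          = ks.flatMap (fun k' => xs.filter (fun y => y.1 == k')) := by
        apply List.flatMap_congr  -- might not exist; fallback below
        intro k' hk'
        have : x.1 ≠ k' := by
          intro h; exact hkn (by rw [hxk] at h; rw [← h] at hk'; exact hk')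
        simp [List.filter_append, this]
      rw [h1, h2]
      simp
    · -- x belongs to a later bucket
      have hx' : x.1 ∈ ks := by cases hx with
        | head => exact absurd rfl hxk
        | tail _ h => exact h
      have hkx : x.1 < k := hk _ hx'
      rw [insertBy_skip x _ _ (by
        intro y hy
        have : y.1 = k := by simpa using (List.of_mem_filter hy)
        omega)]
      rw [ih hks' hx']
      have : (xs ++ [x]).filter (fun y => y.1 == k) = xs.filter (fun y => y.1 == k) := by
        simp [List.filter_append, hxk]
      rw [this]

-- the whole insertion sort, when every key lies in the strictly descending list ks,
-- is the concatenation of the ks-buckets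
lemma foldl_insertBy_buckets (ks : List Int) (hks : ks.Pairwise (· > ·))
    (xs : List (Int × String)) (hxs : ∀ y ∈ xs, y.1 ∈ ks) :
    xs.foldl (fun acc x => PySem.List.insertBy (fun a b : Int × String => decide (b.1 < a.1)) x acc) []
      = ks.flatMap (fun k => xs.filter (fun y => y.1 == k)) := by
  induction xs using List.reverseRecOn with
  | nil => simp
  | append_singleton xs x ih =>
    rw [List.foldl_append]
    simp only [List.foldl_cons, List.foldl_nil]
    rw [ih (fun y hy => hxs y (by simp [hy]))]
    exact insertBy_buckets ks hks x (hxs x (by simp)) xs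

-- every reachable score is one of the ten listed levels
lemma callerScore_mem (c : String) (p : Bool) : callerScore c p ∈ pvLevels := by
  simp only [callerScore, pvLevels]
  split_ifs <;> decide

-- ===== VERDICT (by name: the statement is the Claim_ definition above) =====
theorem prioritize_callers_py_spec : Claim_equal_prioritize_callers_py := by
  unfold Claim_equal_prioritize_callers_py
  intro callers is_public_api _
  unfold Spec_prioritize_callers_py prioritize_callers_py prioritize_callers_py_alt
  simp only [PySem.List.foldl_append_singleton_eq_map, List.nil_append,
    PySem.List.sorted_rev_eq_foldl_insertBy]
  rw [foldl_insertBy_buckets pvLevels (by decide)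
    (callers.map (fun c => (callerScore c is_public_api, c)))
    (by intro y hy; simp only [List.mem_map] at hy
        obtain ⟨c, _, rfl⟩ := hy; exact callerScore_mem c is_public_api)]
  -- rewrite B's two folds to the same flatMap-of-filters form
  have hB : ∀ (scored : List (Int × String)),
      pvLevels.foldl (fun out level =>
        scored.foldl (fun out sc => if sc.1 == level then out ++ [sc.2] else out) out) []
      = pvLevels.flatMap (fun level => (scored.filter (fun sc => sc.1 == level)).map (fun sc => sc.2)) := by
    intro scored
    have : ∀ (out : List String) (level : Int),
        scored.foldl (fun out sc => if sc.1 == level then out ++ [sc.2] else out) out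
          = out ++ (scored.filter (fun sc => sc.1 == level)).map (fun sc => sc.2) :=
      fun out level => PySem.List.foldl_append_if (fun sc => sc.1 == level) (fun sc => sc.2) scored out
    calc pvLevels.foldl (fun out level =>
          scored.foldl (fun out sc => if sc.1 == level then out ++ [sc.2] else out) out) []
        = pvLevels.foldl (fun out level =>
            out ++ (scored.filter (fun sc => sc.1 == level)).map (fun sc => sc.2)) [] := by
          apply PySem.List.foldl_congr_mem
          intro acc x _
          exact this acc x
      _ = _ := by
          rw [PySem.List.foldl_append_eq_flatMap]
          simp
  rw [hB]
  rw [List.map_flatMap]
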